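-- pv_equiv track=rewrite | github.com/WNJXYK/ABLkit | ablkit/reasoning/ifw_dp_batch.py | _decode_flat_indices
-- ===== SOURCE A (Python) =====
-- def _decode_flat_indices(n_hch, ch_h_sizes):
--     """Decode flat hch index to per-child h indices.
--
--     Returns list of n_hch tuples, each of length n_children.
--     """
--     if not ch_h_sizes:
--         return [() for _ in range(n_hch)]
--     result = []
--     for flat in range(n_hch):
--         indices = []
--         remaining = flat
--         for H_ci in reversed(ch_h_sizes):
--             indices.insert(0, remaining % H_ci)
--             remaining //= H_ci
--         result.append(tuple(indices))
--     return result
-- ===== SOURCE B (Python) =====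
-- def _decode_flat_indices(n_hch, ch_h_sizes):
--     """Decode flat hch index to per-child h indices (column-wise).
--
--     Instead of threading a remainder per flat index, compute each digit
--     column for all flat indices at once, then assemble the rows.
--     """
--     if not ch_h_sizes:
--         return [() for _ in range(n_hch)]
--     rems = list(range(n_hch))
--     cols = []
--     for s in reversed(ch_h_sizes):
--         cols.append([r % s for r in rems])
--         rems = [r // s for r in rems]
--     cols.reverse()
--     return [tuple(col[i] for col in cols) for i in range(n_hch)]
-- ===== Notes on version B (the rewrite author's own statement) =====
-- stated objective: faster
-- what changed: A decodes row-wise, threading a remainder per flat index and building each tuple with insert(0); B decodes column-wise: one pass over the sizes computes each digit column for all flat indices at once via list comprehensions, then rows are assembled by indexing the columns.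
import Mathlib
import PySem

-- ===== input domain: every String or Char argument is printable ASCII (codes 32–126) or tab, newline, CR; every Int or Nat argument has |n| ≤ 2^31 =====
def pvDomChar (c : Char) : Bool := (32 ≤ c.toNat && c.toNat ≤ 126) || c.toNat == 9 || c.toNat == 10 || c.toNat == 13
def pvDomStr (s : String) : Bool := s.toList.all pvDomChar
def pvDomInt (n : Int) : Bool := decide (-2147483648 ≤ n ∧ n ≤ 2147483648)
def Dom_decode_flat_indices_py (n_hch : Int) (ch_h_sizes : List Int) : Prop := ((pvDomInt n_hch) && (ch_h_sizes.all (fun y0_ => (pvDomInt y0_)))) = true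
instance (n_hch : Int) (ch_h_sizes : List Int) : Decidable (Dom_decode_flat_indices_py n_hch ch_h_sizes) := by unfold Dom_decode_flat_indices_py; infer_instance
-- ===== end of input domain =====

-- B decodes column-wise (digit-major) instead of A's row-wise remainder threading; return values agree wherever A returns.

-- ===== PORT A =====
def decode_flat_indices_py (n_hch : Int) (ch_h_sizes : List Int) : List (List Int) :=
  if ch_h_sizes = [] then
    (PySem.List.pyRange 0 n_hch 1).map (fun _ => ([] : List Int))
  else
    (PySem.List.pyRange 0 n_hch 1).foldl
      (fun result flat =>
        let st := ch_h_sizes.reverse.foldl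
          (fun (st : List Int × Int) H_ci =>
            (PySem.List.insert st.1 0 (PySem.Int.mod st.2 H_ci),
             PySem.Int.floordiv st.2 H_ci))
          ([], flat)
        result ++ [st.1]) []

-- ===== PORT B =====
def decode_flat_indices_py_alt (n_hch : Int) (ch_h_sizes : List Int) : List (List Int) :=
  if ch_h_sizes = [] then
    (PySem.List.pyRange 0 n_hch 1).map (fun _ => ([] : List Int))
  else
    let st := ch_h_sizes.reverse.foldl
      (fun (st : List (List Int) × List Int) s =>
        (st.1 ++ [st.2.map (fun r => PySem.Int.mod r s)],
         st.2.map (fun r => PySem.Int.floordiv r s)))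
      ([], PySem.List.pyRange 0 n_hch 1)
    let cols := st.1.reverse
    -- col[i]: i is always a valid index (every column has length len(range(n_hch))), so the default of pyGetD is never used
    (PySem.List.pyRange 0 n_hch 1).map (fun i => cols.map (fun col => PySem.List.pyGetD col i 0))

-- ===== PRECONDITION & SPEC =====
-- Pre_ excludes exactly the inputs on which Python A raises ZeroDivisionError: a size 0 together with n_hch > 0.
def Pre_decode_flat_indices_py (n_hch : Int) (ch_h_sizes : List Int) : Prop :=
  0 < n_hch → ¬ (0 : Int) ∈ ch_h_sizes
instance (n_hch : Int) (ch_h_sizes : List Int) : Decidable (Pre_decode_flat_indices_py n_hch ch_h_sizes) := by unfold Pre_decode_flat_indices_py; infer_instance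
def pvWitness_decode_flat_indices_py : Int × List Int := (4, [2, 3])
def Spec_decode_flat_indices_py (n_hch : Int) (ch_h_sizes : List Int) (out : List (List Int)) : Prop := out = decode_flat_indices_py_alt n_hch ch_h_sizes
instance (n_hch : Int) (ch_h_sizes : List Int) (out : List (List Int)) : Decidable (Spec_decode_flat_indices_py n_hch ch_h_sizes out) := by unfold Spec_decode_flat_indices_py; infer_instance

-- ===== CLAIM (what is proved, stated in full; the proofs are below) =====
def Claim_equal_decode_flat_indices_py : Prop := ∀ (n_hch : Int) (ch_h_sizes : List Int), Dom_decode_flat_indices_py n_hch ch_h_sizes → Pre_decode_flat_indices_py n_hch ch_h_sizes → Spec_decode_flat_indices_py n_hch ch_h_sizes (decode_flat_indices_py n_hch ch_h_sizes)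

-- ===== LEMMAS AND PROOFS =====

-- digits of f for the (already reversed) size list l, in output order (most significant first)
def pvRdig : List Int → Int → List Int
  | [], _ => []
  | s :: t, f => pvRdig t (PySem.Int.floordiv f s) ++ [PySem.Int.mod f s]

def pvRfin : List Int → Int → Int
  | [], f => f
  | s :: t, f => pvRfin t (PySem.Int.floordiv f s)

-- the digit columns produced by B's pass, in processing order
def pvColsOf : List Int → List Int → List (List Int)
  | [], _ => []
  | s :: t, rems => rems.map (fun r => PySem.Int.mod r s) :: pvColsOf t (rems.map (fun r => PySem.Int.floordiv r s))

def pvRemsFin : List Int → List Int → List Int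
  | [], rems => rems
  | s :: t, rems => pvRemsFin t (rems.map (fun r => PySem.Int.floordiv r s))

theorem pv_insert_zero (xs : List Int) (v : Int) : PySem.List.insert xs 0 v = v :: xs := by
  simp [PySem.List.insert, PySem.List.sliceIndices]

theorem pv_afold (l : List Int) (idx : List Int) (f : Int) :
    l.foldl
      (fun (st : List Int × Int) H =>
        (PySem.List.insert st.1 0 (PySem.Int.mod st.2 H), PySem.Int.floordiv st.2 H))
      (idx, f)
    = (pvRdig l f ++ idx, pvRfin l f) := by
  induction l generalizing idx f with
  | nil => simp [pvRdig, pvRfin]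
  | cons s t ih =>
    rw [List.foldl_cons, ih]
    simp [pvRdig, pvRfin, pv_insert_zero]

theorem pv_bfold (l : List Int) (cols : List (List Int)) (rems : List Int) :
    l.foldl
      (fun (st : List (List Int) × List Int) s =>
        (st.1 ++ [st.2.map (fun r => PySem.Int.mod r s)],
         st.2.map (fun r => PySem.Int.floordiv r s)))
      (cols, rems)
    = (cols ++ pvColsOf l rems, pvRemsFin l rems) := by
  induction l generalizing cols rems with
  | nil => simp [pvColsOf, pvRemsFin]
  | cons s t ih => simp [pvColsOf, pvRemsFin, ih]

theorem pv_cols_row (l : List Int) (rems : List Int) (i : Int)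
    (h0 : 0 ≤ i) (hlt : i.toNat < rems.length) :
    (pvColsOf l rems).map (fun col => PySem.List.pyGetD col i 0)
    = (pvRdig l (rems[i.toNat])).reverse := by
  induction l generalizing rems with
  | nil => simp [pvColsOf, pvRdig]
  | cons s t ih =>
    have hlen : i.toNat < (rems.map (fun r => PySem.Int.floordiv r s)).length := by simpa using hlt
    have hib : i < ((rems.map (fun r => PySem.Int.mod r s)).length : Int) := by
      simp only [List.length_map]
      omega
    have hget : PySem.List.pyGetD (rems.map (fun r => PySem.Int.mod r s)) i 0
        = PySem.Int.mod (rems[i.toNat]) s := by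
      rw [PySem.List.pyGetD_eq_getElem _ 0 h0 hib]
      simp
    simp [pvColsOf, pvRdig, hget, ih _ hlen]

theorem pv_foldl_push (g : Int → List Int) (l : List Int) (acc : List (List Int)) :
    l.foldl (fun r x => r ++ [g x]) acc = acc ++ l.map g := by
  induction l generalizing acc with
  | nil => simp
  | cons x t ih => simp [ih]

-- ===== VERDICT (by name: the statement is the Claim_ definition above) =====
theorem decode_flat_indices_py_spec : Claim_equal_decode_flat_indices_py := by
  intro n_hch ch_h_sizes _ _
  unfold Spec_decode_flat_indices_py decode_flat_indices_py decode_flat_indices_py_alt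
  by_cases h : ch_h_sizes = []
  · simp [h]
  · rw [if_neg h, if_neg h]
    rw [pv_bfold]
    rw [pv_foldl_push]
    simp only [List.nil_append, pv_afold, List.append_nil]
    refine List.map_congr_left ?_
    intro i hi
    have hmem : 0 ≤ i ∧ i < n_hch := by
      have := (PySem.List.mem_pyRange_one (a := 0) (b := n_hch) (x := i)).mp hi
      omega
    have hlt : i.toNat < (PySem.List.pyRange 0 n_hch 1).length := by
      rw [PySem.List.length_pyRange_one]
      omega
    rw [List.map_reverse, pv_cols_row _ _ _ hmem.1 hlt]
    have hval : (PySem.List.pyRange 0 n_hch 1)[i.toNat] = i := by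
      rw [PySem.List.getElem_pyRange_one]
      omega
    rw [hval, List.reverse_reverse]
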